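-- pv_equiv track=rewrite | github.com/Torja99/Tana | Tana-Assistant/gui_main.py | split_for_type_writer_effect
-- ===== SOURCE A (Python) =====
-- def split_for_type_writer_effect(string):
--     list = []
--     for index in range(len(string)):
--
--         if index == 0:
--             list.append(string[index])
--         else:
--             list.append(f"{list[index-1]} {string[index]}")
--
--     return list
-- ===== SOURCE B (Python) =====
-- def split_for_type_writer_effect(string):
--     # each output element is computed independently: the space-joined prefix of length i
--     return [' '.join(string[:i]) for i in range(1, len(string) + 1)]
-- ===== Notes on version B (the rewrite author's own statement) =====
-- stated objective: idiomatic
-- what changed: Replaces the stateful loop that appends to and reads back from the growing result list (list[index-1]) by a stateless comprehension computing each element independently as the space-join of the prefix slice string[:i].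
import Mathlib
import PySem

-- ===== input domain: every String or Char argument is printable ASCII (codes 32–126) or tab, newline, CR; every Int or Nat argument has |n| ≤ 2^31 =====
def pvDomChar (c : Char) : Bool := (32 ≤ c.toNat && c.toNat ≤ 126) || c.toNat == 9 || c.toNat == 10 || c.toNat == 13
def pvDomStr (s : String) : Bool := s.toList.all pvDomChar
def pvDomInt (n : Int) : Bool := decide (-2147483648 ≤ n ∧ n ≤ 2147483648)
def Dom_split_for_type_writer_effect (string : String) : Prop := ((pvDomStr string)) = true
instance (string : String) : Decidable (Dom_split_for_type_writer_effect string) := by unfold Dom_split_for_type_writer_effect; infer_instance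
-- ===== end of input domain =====

-- B replaces A's stateful loop (which reads its own growing result back via list[index-1])
-- by a stateless comprehension computing each element independently as the space-join of string[:i].

-- ===== PORT A =====
-- loop body: index 0 appends the raw character, otherwise list[index-1] + " " + string[index]
def pvStepA (s : String) (acc : List String) (index : Int) : List String :=
  if index = 0 then
    acc ++ [String.ofList [(PySem.Str.pyGet? s index).getD ' ']]
  else
    acc ++ [String.ofList ((PySem.List.pyGetD acc (index - 1) "").toList
              ++ ' ' :: [(PySem.Str.pyGet? s index).getD ' '])]

def split_for_type_writer_effect (string : String) : List String :=
  (PySem.List.pyRange 0 (PySem.Str.len string) 1).foldl (pvStepA string) []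

-- ===== PORT B =====
-- [space-join of string[:i] for i in range(1, len(string)+1)]; join iterates the slice's chars
def split_for_type_writer_effect_alt (string : String) : List String :=
  (PySem.List.pyRange 1 (PySem.Str.len string + 1) 1).map
    (fun i => PySem.Str.join " "
      ((PySem.Str.slice string none (some i)).toList.map (fun c => String.ofList [c])))

-- ===== PRECONDITION & SPEC =====
def Spec_split_for_type_writer_effect (string : String) (out : List String) : Prop := out = split_for_type_writer_effect_alt string
instance (string : String) (out : List String) : Decidable (Spec_split_for_type_writer_effect string out) := by unfold Spec_split_for_type_writer_effect; infer_instance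

-- ===== CLAIM (what is proved, stated in full; the proofs are below) =====
def Claim_equal_split_for_type_writer_effect : Prop := ∀ (string : String), Dom_split_for_type_writer_effect string → Spec_split_for_type_writer_effect string (split_for_type_writer_effect string)

-- ===== LEMMAS AND PROOFS =====

-- the space-joined list of single characters; common characterisation of both ports' elements
def pvJo (cs : List Char) : List Char :=
  PySem.Chars.join [' '] (cs.map (fun c => [c]))

-- the intended result: element k is the joined prefix of length k+1
def pvTarget (s : List Char) (n : Nat) : List String :=
  (List.range n).map (fun k => String.ofList (pvJo (s.take (k + 1))))

theorem pv_join_snoc (sep q : List Char) :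
    ∀ (ps : List (List Char)) (p : List Char),
      PySem.Chars.join sep ((p :: ps) ++ [q])
        = PySem.Chars.join sep (p :: ps) ++ sep ++ q := by
  intro ps
  induction ps with
  | nil =>
    intro p
    simp [PySem.Chars.join_cons_cons, PySem.Chars.join_singleton]
  | cons r rs ih =>
    intro p
    simp only [List.cons_append] at ih ⊢
    rw [PySem.Chars.join_cons_cons sep p r (rs ++ [q]), ih r,
      PySem.Chars.join_cons_cons sep p r rs]
    simp

theorem pvJo_snoc (cs : List Char) (c : Char) (h : cs ≠ []) :
    pvJo (cs ++ [c]) = pvJo cs ++ ' ' :: [c] := by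
  cases cs with
  | nil => exact absurd rfl h
  | cons p ps =>
    unfold pvJo
    have : ((p :: ps) ++ [c]).map (fun c => [c])
        = (([p] : List Char) :: ps.map (fun c => [c])) ++ [[c]] := by simp
    rw [this, pv_join_snoc]
    simp

theorem pvJoinStr (cs : List Char) :
    PySem.Str.join " " (cs.map (fun c => String.ofList [c])) = String.ofList (pvJo cs) := by
  have h2 : (cs.map (fun c => String.ofList [c])).map String.toList
      = cs.map (fun c => [c]) := by
    simp [List.map_map, Function.comp]
  have h : (PySem.Str.join " " (cs.map (fun c => String.ofList [c]))).toList = pvJo cs := by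
    rw [PySem.Str.toList_join, h2]
    rfl
  have h3 := congrArg String.ofList h
  rwa [String.ofList_toList] at h3

-- B computes pvTarget
theorem pvB_eq_target (s : String) :
    split_for_type_writer_effect_alt s = pvTarget s.toList s.toList.length := by
  unfold split_for_type_writer_effect_alt pvTarget
  rw [PySem.Str.len_eq, PySem.List.pyRange_one]
  have hlen : (((s.toList.length : Int) + 1) - 1).toNat = s.toList.length := by omega
  rw [hlen, List.map_map]
  apply List.map_congr_left
  intro k hk
  simp only [Function.comp]
  have hcast : (1 : Int) + (k : Int) = ((k + 1 : Nat) : Int) := by push_cast; ring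
  rw [hcast]
  have hsl : (PySem.Str.slice s none (some ((k + 1 : Nat) : Int))).toList
      = s.toList.take (k + 1) := by
    rw [PySem.Str.toList_slice, PySem.Chars.slice_eq_listSlice, PySem.List.slice_to_natCast]
  rw [hsl, pvJoinStr]

-- A's loop computes pvTarget (loop invariant, by induction on the trip count)
theorem pvA_loop (s : String) :
    ∀ (n : Nat), n ≤ s.toList.length →
      (PySem.List.pyRange 0 (n : Int) 1).foldl (pvStepA s) [] = pvTarget s.toList n := by
  intro n
  induction n with
  | zero =>
    intro _
    rw [PySem.List.pyRange_one_eq_nil (by omega)]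
    rfl
  | succ n ih =>
    intro hle
    have hn : n < s.toList.length := by omega
    have hcast : ((n + 1 : Nat) : Int) = (n : Int) + 1 := by push_cast; ring
    rw [hcast, PySem.List.pyRange_one_succ_right (by omega), List.foldl_append,
      ih (by omega)]
    simp only [List.foldl_cons, List.foldl_nil]
    have hget : PySem.Str.pyGet? s (n : Int) = some s.toList[n] := by
      rw [PySem.Str.pyGet?_natCast, List.getElem?_eq_getElem hn]
    have htake : s.toList.take (n + 1) = s.toList.take n ++ [s.toList[n]] := by
      rw [List.take_add_one, List.getElem?_eq_getElem hn]
      rfl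
    have htgt : pvTarget s.toList (n + 1)
        = pvTarget s.toList n ++ [String.ofList (pvJo (s.toList.take (n + 1)))] := by
      unfold pvTarget
      rw [List.range_succ, List.map_append]
      rfl
    rw [htgt]
    unfold pvStepA
    by_cases h0 : (n : Int) = 0
    · have hn0 : n = 0 := by exact_mod_cast h0
      subst hn0
      rw [if_pos (by norm_num : ((0 : Nat) : Int) = 0), hget]
      have : pvJo (s.toList.take 1) = [s.toList[0]] := by
        rw [htake]
        simp [pvJo, PySem.Chars.join_singleton]
      rw [this]
      rfl
    · rw [if_neg h0]
      have hn1 : 1 ≤ n := by omega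
      congr 2
      have hidx : (n : Int) - 1 = ((n - 1 : Nat) : Int) := by omega
      have hlenT : (pvTarget s.toList n).length = n := by
        unfold pvTarget; simp
      have hprev : PySem.List.pyGetD (pvTarget s.toList n) ((n : Int) - 1) ""
          = String.ofList (pvJo (s.toList.take n)) := by
        rw [hidx, PySem.List.pyGetD_natCast]
        unfold pvTarget
        rw [List.getD_eq_getElem?_getD]
        have hlt : n - 1 < (List.range n).length := by simp; omega
        rw [List.getElem?_map]
        simp only [List.getElem?_range (by omega : n - 1 < n)]
        have : n - 1 + 1 = n := by omega
        simp [this]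
      rw [hget, hprev]
      have : (String.ofList (pvJo (s.toList.take n))).toList = pvJo (s.toList.take n) := by
        simp
      rw [this, Option.getD_some]
      congr 1
      rw [htake, pvJo_snoc _ _ (by
        have : (s.toList.take n).length = n := by
          rw [List.length_take]; omega
        intro hnil
        rw [hnil] at this
        simp at this
        omega)]

-- ===== VERDICT (by name: the statement is the Claim_ definition above) =====
theorem split_for_type_writer_effect_spec : Claim_equal_split_for_type_writer_effect := by
  intro s _
  unfold Spec_split_for_type_writer_effect split_for_type_writer_effect
  rw [PySem.Str.len_eq, pvA_loop s s.toList.length (le_refl _), pvB_eq_target]
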